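-- pv_equiv track=rewrite | github.com/LiFE-124C41/reach-conn-checker | reach_conn_checker/yaku_rules.py | _check_ippeiko
-- ===== SOURCE A (Python) =====
-- def _check_ippeiko(melds):
--     # Two identical sequences
--     # e.g. [1,2,3] and [1,2,3] (same suit)
--     seqs = []
--     for m_type, m_tiles in melds:
--         if m_type == 'shuntsu':
--             # m_tiles is tuple/list of ints, e.g. [1,2,3]
--             seqs.append(tuple(m_tiles))
--
--     # Check for duplicates
--     seen = set()
--     for s in seqs:
--         if s in seen:
--             return True
--         seen.add(s)
--     return False
-- ===== SOURCE B (Python) =====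
-- def _check_ippeiko(melds):
--     # Sort the shuntsu tile-tuples, then a duplicate must appear as two
--     # equal adjacent entries.
--     seqs = sorted(tuple(m_tiles) for m_type, m_tiles in melds
--                   if m_type == 'shuntsu')
--     return any(a == b for a, b in zip(seqs, seqs[1:]))
-- ===== Notes on version B (the rewrite author's own statement) =====
-- stated objective: alternative
-- what changed: Replaces A's seen-set early-return duplicate scan with sort-then-adjacent-pair comparison over the shuntsu tuples.
import Mathlib
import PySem

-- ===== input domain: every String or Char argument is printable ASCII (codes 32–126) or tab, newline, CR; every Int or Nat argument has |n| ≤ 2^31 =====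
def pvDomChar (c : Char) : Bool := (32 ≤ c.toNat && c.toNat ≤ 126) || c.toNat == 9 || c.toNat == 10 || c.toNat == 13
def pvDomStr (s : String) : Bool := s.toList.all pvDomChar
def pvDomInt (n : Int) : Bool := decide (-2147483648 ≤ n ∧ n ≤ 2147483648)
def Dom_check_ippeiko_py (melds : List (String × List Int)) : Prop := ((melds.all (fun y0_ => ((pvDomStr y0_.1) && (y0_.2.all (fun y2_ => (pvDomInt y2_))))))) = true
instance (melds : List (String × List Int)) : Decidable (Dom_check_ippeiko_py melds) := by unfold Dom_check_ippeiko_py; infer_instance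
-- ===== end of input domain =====

-- B replaces A's seen-set duplicate scan with sort-then-adjacent-pair comparison (alternative decomposition, same result).

-- ===== PORT A =====
-- body of the 'for m_type, m_tiles in melds' loop
def pvStep (seqs : List (List Int)) (m : String × List Int) : List (List Int) :=
  if m.1 == "shuntsu" then seqs ++ [m.2] else seqs

def pvSeqsA (melds : List (String × List Int)) : List (List Int) :=
  melds.foldl pvStep []

-- the 'for s in seqs' loop with early return True on a seen element
def pvDupLoop : List (List Int) → PySem.Set (List Int) → Bool
  | [], _ => false
  | s :: rest, seen =>
      if PySem.Set.contains seen s then true else pvDupLoop rest (PySem.Set.add seen s)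

def check_ippeiko_py (melds : List (String × List Int)) : Bool :=
  pvDupLoop (pvSeqsA melds) PySem.Set.empty

-- ===== PORT B =====
-- Python's sorted(xs) with identity key; the lexicographic order on List Int is Python's tuple comparison
def pvSortIdLex {α : Type} [LinearOrder α] (xs : List α) : List α :=
  PySem.List.sorted xs (fun x => x) false

-- 'any(a == b for a, b in zip(seqs, seqs[1:]))': adjacent-pair scan
def pvAdjEq : List (List Int) → Bool
  | a :: b :: t => a == b || pvAdjEq (b :: t)
  | _ => false

def check_ippeiko_py_alt (melds : List (String × List Int)) : Bool :=
  pvAdjEq (pvSortIdLex ((melds.filter (fun m => m.1 == "shuntsu")).map Prod.snd))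

-- ===== PRECONDITION & SPEC =====
def Spec_check_ippeiko_py (melds : List (String × List Int)) (out : Bool) : Prop := out = check_ippeiko_py_alt melds
instance (melds : List (String × List Int)) (out : Bool) : Decidable (Spec_check_ippeiko_py melds out) := by unfold Spec_check_ippeiko_py; infer_instance

-- ===== CLAIM (what is proved, stated in full; the proofs are below) =====
def Claim_equal_check_ippeiko_py : Prop := ∀ (melds : List (String × List Int)), Dom_check_ippeiko_py melds → Spec_check_ippeiko_py melds (check_ippeiko_py melds)

-- ===== LEMMAS AND PROOFS =====

theorem pvSeqsA_foldl (melds : List (String × List Int)) (acc : List (List Int)) :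
    List.foldl pvStep acc melds
      = acc ++ (melds.filter (fun m => m.1 == "shuntsu")).map Prod.snd := by
  induction melds generalizing acc with
  | nil => simp
  | cons m t ih =>
    rw [List.foldl_cons, ih, List.filter_cons]
    by_cases hb : m.1 = "shuntsu"
    · simp [pvStep, hb]
    · simp [pvStep, hb]

theorem pvSeqsA_eq (melds : List (String × List Int)) :
    pvSeqsA melds = (melds.filter (fun m => m.1 == "shuntsu")).map Prod.snd := by
  unfold pvSeqsA
  simpa using pvSeqsA_foldl melds []

theorem pvDupLoop_cons (s : List Int) (rest : List (List Int)) (seen : PySem.Set (List Int)) :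
    pvDupLoop (s :: rest) seen
      = if PySem.Set.contains seen s then true else pvDupLoop rest (PySem.Set.add seen s) := rfl

theorem pvDupLoop_false_iff (seqs : List (List Int)) :
    ∀ seen : PySem.Set (List Int),
      pvDupLoop seqs seen = false ↔ seqs.Nodup ∧ ∀ x ∈ seqs, x ∉ seen := by
  induction seqs with
  | nil => intro seen; simp [pvDupLoop]
  | cons s rest ih =>
    intro seen
    by_cases h : s ∈ seen
    · have hc : PySem.Set.contains seen s = true := by
        simp [PySem.Set.contains_eq_listContains, h]
      rw [pvDupLoop_cons, hc]
      constructor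
      · intro hfalse; simp at hfalse
      · rintro ⟨-, hmem⟩; exact ((hmem s (by simp)) h).elim
    · have hc : PySem.Set.contains seen s = false := by
        simp [PySem.Set.contains_eq_listContains, h]
      rw [pvDupLoop_cons, hc]
      simp only [Bool.false_eq_true, if_false]
      rw [ih (PySem.Set.add seen s)]
      constructor
      · rintro ⟨hnd, hmem⟩
        have hsr : s ∉ rest := fun hmem0 => by
          have := hmem s hmem0; simp [PySem.Set.mem_add] at this
        refine ⟨List.nodup_cons.mpr ⟨hsr, hnd⟩, ?_⟩
        intro x hx
        rcases List.mem_cons.mp hx with rfl | hx'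
        · exact h
        · have := hmem x hx'
          simp only [PySem.Set.mem_add, not_or] at this
          exact this.1
      · rintro ⟨hnd, hmem⟩
        rcases List.nodup_cons.mp hnd with ⟨hsr, hnd'⟩
        refine ⟨hnd', ?_⟩
        intro x hx
        simp only [PySem.Set.mem_add, not_or]
        exact ⟨hmem x (List.mem_cons_of_mem _ hx), fun hxs => hsr (hxs ▸ hx)⟩

theorem pvAdjEq_false_iff (ys : List (List Int)) :
    pvAdjEq ys = false ↔ ys.IsChain (· ≠ ·) := by
  induction ys with
  | nil => simp [pvAdjEq]
  | cons a t ih =>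
    cases t with
    | nil => simp [pvAdjEq]
    | cons b t' =>
      rw [List.isChain_cons_cons, ← ih]
      simp [pvAdjEq, Bool.or_eq_false_iff]

theorem pairwise_lt_of_le_chain_ne {α : Type} [LinearOrder α] (ys : List α) :
    ys.Pairwise (· ≤ ·) → ys.IsChain (· ≠ ·) → ys.Pairwise (· < ·) := by
  induction ys with
  | nil => intro _ _; exact List.Pairwise.nil
  | cons a t ih =>
    intro hp hc
    rcases List.pairwise_cons.mp hp with ⟨hle, hpt⟩
    cases t with
    | nil => simp
    | cons b t' =>
      rcases List.isChain_cons_cons.mp hc with ⟨hab, hct⟩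
      have hplt := ih hpt hct
      have hab' : a < b := lt_of_le_of_ne (hle b (by simp)) hab
      refine List.pairwise_cons.mpr ⟨?_, hplt⟩
      intro c hc'
      rcases List.mem_cons.mp hc' with rfl | hct'
      · exact hab'
      · exact lt_trans hab' ((List.pairwise_cons.mp hplt).1 c hct')

theorem pvSortIdLex_perm {α : Type} [LinearOrder α] (xs : List α) : (pvSortIdLex xs).Perm xs := by
  unfold pvSortIdLex
  exact PySem.List.sorted_perm xs (fun x => x) false

theorem pvSortIdLex_pairwise {α : Type} [LinearOrder α] (xs : List α) :
    (pvSortIdLex xs).Pairwise (· ≤ ·) := by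
  unfold pvSortIdLex
  simpa using PySem.List.sorted_pairwise xs (fun x => x)

theorem pv_main (seqs : List (List Int)) :
    pvDupLoop seqs PySem.Set.empty = pvAdjEq (pvSortIdLex seqs) := by
  have hperm := pvSortIdLex_perm seqs
  have hpw := pvSortIdLex_pairwise seqs
  by_cases hnd : seqs.Nodup
  · have hA : pvDupLoop seqs PySem.Set.empty = false :=
      (pvDupLoop_false_iff seqs _).mpr ⟨hnd, by intro x _; simp [PySem.Set.empty]⟩
    have hB : pvAdjEq (pvSortIdLex seqs) = false :=
      (pvAdjEq_false_iff _).mpr (List.Pairwise.isChain (hperm.nodup_iff.mpr hnd))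
    rw [hA, hB]
  · have hA : pvDupLoop seqs PySem.Set.empty = true := by
      cases hA' : pvDupLoop seqs PySem.Set.empty with
      | false => exact absurd ((pvDupLoop_false_iff seqs _).mp hA').1 hnd
      | true => rfl
    have hB : pvAdjEq (pvSortIdLex seqs) = true := by
      cases hB' : pvAdjEq (pvSortIdLex seqs) with
      | false =>
        have hlt := pairwise_lt_of_le_chain_ne _ hpw ((pvAdjEq_false_iff _).mp hB')
        exact absurd (hperm.nodup_iff.mp (hlt.imp ne_of_lt)) hnd
      | true => rfl
    rw [hA, hB]

-- ===== VERDICT (by name: the statement is the Claim_ definition above) =====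
theorem check_ippeiko_py_spec : Claim_equal_check_ippeiko_py := by
  intro melds _
  unfold Spec_check_ippeiko_py check_ippeiko_py check_ippeiko_py_alt
  rw [pvSeqsA_eq]
  exact pv_main _
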